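-- pv_equiv track=rewrite | github.com/pejofv93/prediction-intelligence | services/polymarket-agent/scanner.py | _build_category_buckets
-- ===== SOURCE A (Python) =====
-- _SCAN_CATEGORIES: dict[str, list[str]] = {
--     "crypto":      ["btc", "bitcoin", "eth", "ethereum", "crypto", "solana", "defi", "blockchain", "altcoin", "halving"],
--     "sports":      ["world cup", "champions league", "nba", "super bowl", "final", "tournament", "championship", "nfl", "mlb", "wimbledon", "olympic", "copa"],
--     "politics":    ["election", "president", "vote", "congress", "senate", "minister", "parliament", "referendum", "prime minister", "chancellor"],
--     "culture":     ["oscar", "grammy", "emmy", "movie", "album", "singer", "actor", "celebrity", "taylor", "award", "box office", "netflix", "spotify", "billboard"],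
--     "geopolitics": ["war", "ceasefire", "iran", "strait", "hormuz", "conflict", "nato", "military", "invasion", "sanctions", "nuclear", "missile"],
--     "science":     ["climate", "nasa", "space", "vaccine", "fda", "cancer", "quantum", "discovery", "mission", "ai model"],
--     "business":    ["apple", "tesla", "microsoft", "amazon", "google", "meta", "nvidia", "earnings", "merger", "acquisition", "ipo", "layoffs"],
-- }
--
-- def _categorize_for_scan(question: str) -> str:
--     q = question.lower()
--     for cat, kws in _SCAN_CATEGORIES.items():
--         if any(kw in q for kw in kws):
--             return cat
--     return "other"
--
-- def _build_category_buckets(by_vol: list[dict]) -> dict[str, list[dict]]: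
--     """Clasifica mercados ya ordenados por volumen en buckets por categoría."""
--     buckets: dict[str, list[dict]] = {
--         cat: [] for cat in list(_SCAN_CATEGORIES.keys()) + ["other"]
--     }
--     for m in by_vol:
--         cat = _categorize_for_scan(m.get("question", ""))
--         buckets.setdefault(cat, []).append(m)
--     return buckets
-- ===== SOURCE B (Python) =====
-- _SCAN_CATEGORIES: dict[str, list[str]] = {
--     "crypto":      ["btc", "bitcoin", "eth", "ethereum", "crypto", "solana", "defi", "blockchain", "altcoin", "halving"],
--     "sports":      ["world cup", "champions league", "nba", "super bowl", "final", "tournament", "championship", "nfl", "mlb", "wimbledon", "olympic", "copa"],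
--     "politics":    ["election", "president", "vote", "congress", "senate", "minister", "parliament", "referendum", "prime minister", "chancellor"],
--     "culture":     ["oscar", "grammy", "emmy", "movie", "album", "singer", "actor", "celebrity", "taylor", "award", "box office", "netflix", "spotify", "billboard"],
--     "geopolitics": ["war", "ceasefire", "iran", "strait", "hormuz", "conflict", "nato", "military", "invasion", "sanctions", "nuclear", "missile"],
--     "science":     ["climate", "nasa", "space", "vaccine", "fda", "cancer", "quantum", "discovery", "mission", "ai model"],
--     "business":    ["apple", "tesla", "microsoft", "amazon", "google", "meta", "nvidia", "earnings", "merger", "acquisition", "ipo", "layoffs"],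
-- }
--
--
-- def _first_category(m: dict) -> str:
--     q = m.get("question", "").lower()
--     return next((cat for cat, kws in _SCAN_CATEGORIES.items()
--                  if any(kw in q for kw in kws)), "other")
--
--
-- def _build_category_buckets(by_vol: list[dict]) -> dict[str, list[dict]]:
--     """One bucket per category: the markets (in order) whose first matching category is it."""
--     return {cat: [m for m in by_vol if _first_category(m) == cat]
--             for cat in [*_SCAN_CATEGORIES, "other"]}
-- ===== Notes on version B (the rewrite author's own statement) =====
-- stated objective: simpler
-- what changed: Replaces the mutably-updated dict of buckets (setdefault+append per market in one pass) by a dict comprehension that builds each category's bucket as a filter of by_vol on 'first matching category equals this one', with empties and the 'other' bucket falling out of the same comprehension.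
import Mathlib
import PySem

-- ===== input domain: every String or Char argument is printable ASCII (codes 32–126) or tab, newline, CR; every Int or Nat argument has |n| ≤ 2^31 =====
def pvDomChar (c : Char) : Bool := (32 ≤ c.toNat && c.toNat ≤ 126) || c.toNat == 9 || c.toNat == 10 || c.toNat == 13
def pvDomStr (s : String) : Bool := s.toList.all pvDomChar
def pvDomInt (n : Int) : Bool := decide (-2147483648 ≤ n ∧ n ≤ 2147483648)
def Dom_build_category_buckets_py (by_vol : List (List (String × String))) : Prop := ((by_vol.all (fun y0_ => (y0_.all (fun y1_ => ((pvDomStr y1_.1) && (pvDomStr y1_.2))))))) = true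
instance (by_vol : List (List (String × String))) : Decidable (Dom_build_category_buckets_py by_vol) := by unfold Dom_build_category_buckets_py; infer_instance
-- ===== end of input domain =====

-- B replaces A's single pass that appends each market into a mutably-updated dict by a
-- per-category dict comprehension filtering by_vol on "first matching category = this one"
-- (same value; objective: simpler decomposition, not faster).

-- ===== PORT A =====
-- _SCAN_CATEGORIES: a dict iterated in insertion order; ported as its items list.
def pvScanCategories : List (String × List String) :=
  [("crypto",      ["btc", "bitcoin", "eth", "ethereum", "crypto", "solana", "defi", "blockchain", "altcoin", "halving"]),
   ("sports",      ["world cup", "champions league", "nba", "super bowl", "final", "tournament", "championship", "nfl", "mlb", "wimbledon", "olympic", "copa"]),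
   ("politics",    ["election", "president", "vote", "congress", "senate", "minister", "parliament", "referendum", "prime minister", "chancellor"]),
   ("culture",     ["oscar", "grammy", "emmy", "movie", "album", "singer", "actor", "celebrity", "taylor", "award", "box office", "netflix", "spotify", "billboard"]),
   ("geopolitics", ["war", "ceasefire", "iran", "strait", "hormuz", "conflict", "nato", "military", "invasion", "sanctions", "nuclear", "missile"]),
   ("science",     ["climate", "nasa", "space", "vaccine", "fda", "cancer", "quantum", "discovery", "mission", "ai model"]),
   ("business",    ["apple", "tesla", "microsoft", "amazon", "google", "meta", "nvidia", "earnings", "merger", "acquisition", "ipo", "layoffs"])]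

-- the 'for cat, kws in _SCAN_CATEGORIES.items(): if any(...): return cat' loop of _categorize_for_scan
def pvCategorizeGo (q : String) : List (String × List String) → String
  | [] => "other"
  | (cat, kws) :: rest =>
      if kws.any (fun kw => PySem.Str.isIn kw q) then cat else pvCategorizeGo q rest

def categorize_for_scan (question : String) : String :=
  pvCategorizeGo (PySem.Str.lower question) pvScanCategories

def build_category_buckets_py (by_vol : List (List (String × String))) : List (String × List (List (String × String))) :=
  -- buckets = {cat: [] for cat in list(_SCAN_CATEGORIES.keys()) + ["other"]}, then
  -- for m in by_vol: buckets.setdefault(cat, []).append(m)  — setdefault followed by the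
  -- in-place append is exactly Dict.modify cat [] (· ++ [m]) (d[k] = f(d.get(k, dflt)))
  (by_vol.foldl (fun buckets m =>
      buckets.modify (categorize_for_scan (PySem.Dict.getD (PySem.Dict.mk m) "question" "")) []
        (fun l => l ++ [m]))
    (((pvScanCategories.map Prod.fst) ++ ["other"]).foldl (fun d c => d.insert c [])
      PySem.Dict.empty)).items

-- ===== PORT B =====
-- next((cat for cat, kws in _SCAN_CATEGORIES.items() if any(kw in q for kw in kws)), "other")
def pvFirstCategory (m : List (String × String)) : String :=
  let q := PySem.Str.lower (PySem.Dict.getD (PySem.Dict.mk m) "question" "")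
  (((pvScanCategories.find? (fun p => p.2.any (fun kw => PySem.Str.isIn kw q))).map Prod.fst).getD "other")

def build_category_buckets_py_alt (by_vol : List (List (String × String))) : List (String × List (List (String × String))) :=
  ((pvScanCategories.map Prod.fst) ++ ["other"]).map (fun cat =>
    (cat, by_vol.filter (fun m => pvFirstCategory m == cat)))

-- ===== PRECONDITION & SPEC =====
def Spec_build_category_buckets_py (by_vol : List (List (String × String))) (out : List (String × List (List (String × String)))) : Prop := out = build_category_buckets_py_alt by_vol
instance (by_vol : List (List (String × String))) (out : List (String × List (List (String × String)))) : Decidable (Spec_build_category_buckets_py by_vol out) := by unfold Spec_build_category_buckets_py; infer_instance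

-- ===== CLAIM (what is proved, stated in full; the proofs are below) =====
def Claim_equal_build_category_buckets_py : Prop := ∀ (by_vol : List (List (String × String))), Dom_build_category_buckets_py by_vol → Spec_build_category_buckets_py by_vol (build_category_buckets_py by_vol)

-- ===== LEMMAS AND PROOFS =====

theorem pv_dict_ext {κ ν : Type} (a b : PySem.Dict κ ν) (h : a.items = b.items) : a = b := by
  cases a; cases b; simpa [PySem.Dict.items] using h

-- A's early-return category loop equals B's find?-based first category
theorem pv_go_eq_find (q : String) (L : List (String × List String)) :
    pvCategorizeGo q L
      = (((L.find? (fun p => p.2.any (fun kw => PySem.Str.isIn kw q))).map Prod.fst).getD "other") := by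
  induction L with
  | nil => rfl
  | cons p rest ih =>
      obtain ⟨cat, kws⟩ := p
      by_cases h : ∃ kw ∈ kws, PySem.Chars.isIn kw.toList q.toList = true
      · simp [pvCategorizeGo, h]
      · simp [pvCategorizeGo, h, ih]

theorem pv_categorize_eq (m : List (String × String)) :
    categorize_for_scan (PySem.Dict.getD (PySem.Dict.mk m) "question" "") = pvFirstCategory m := by
  simp [categorize_for_scan, pvFirstCategory, pv_go_eq_find]

theorem pv_find_fst_mem {α β : Type} (L : List (α × β)) (pred : α × β → Bool) (d : α) :
    ((L.find? pred).map Prod.fst).getD d ∈ (L.map Prod.fst) ++ [d] := by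
  cases h : L.find? pred with
  | none => simp
  | some p =>
      simp only [Option.map_some, Option.getD_some]
      exact List.mem_append_left _ (List.mem_map_of_mem (List.mem_of_find?_eq_some h))

theorem pv_first_mem (m : List (String × String)) :
    pvFirstCategory m ∈ (pvScanCategories.map Prod.fst) ++ ["other"] :=
  pv_find_fst_mem pvScanCategories _ "other"

-- find? over a key-tagged map finds the first occurrence of k, whose value is f k
theorem pv_find_map_key {β : Type} (L : List String) (f : String → β) (k : String) (hk : k ∈ L) :
    (L.map (fun c => (c, f c))).find? (fun p => p.1 == k) = some (k, f k) := by
  induction L with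
  | nil => cases hk
  | cons c rest ih =>
      by_cases h : c = k
      · subst h; simp
      · have hk' : k ∈ rest := by
          rcases List.mem_cons.mp hk with h' | h'
          · exact absurd h'.symm h
          · exact h'
        simp [h, ih hk']

-- Dict.modify on a key-tagged map dict rewrites exactly the k-entries
theorem pv_modify_map {β : Type} (L : List String) (f : String → β) (k : String) (hk : k ∈ L)
    (dflt : β) (g : β → β) :
    PySem.Dict.modify (PySem.Dict.mk (L.map (fun c => (c, f c)))) k dflt g
      = PySem.Dict.mk (L.map (fun c => (c, if c = k then g (f k) else f c))) := by
  have hget : (PySem.Dict.mk (L.map (fun c => (c, f c)))).get? k = some (f k) := by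
    simp [PySem.Dict.get?, pv_find_map_key L f k hk]
  have hcont : (PySem.Dict.mk (L.map (fun c => (c, f c)))).contains k = true := by
    rw [PySem.Dict.contains_eq_isSome_get?, hget]; rfl
  have hgetD : (PySem.Dict.mk (L.map (fun c => (c, f c)))).getD k dflt = f k := by
    simp [PySem.Dict.getD, hget]
  unfold PySem.Dict.modify
  rw [hgetD]
  apply pv_dict_ext
  rw [PySem.Dict.items_insert_of_contains _ _ hcont]
  simp only [List.map_map]
  apply List.map_congr_left
  intro c _
  by_cases h : c = k
  · subst h; simp
  · simp [Function.comp, h, beq_iff_eq]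

-- the bucket-filling fold over a fully pre-keyed dict is a per-key filter
theorem pv_fold_modify (catf : List (String × String) → String) (L : List String)
    (xs : List (List (String × String))) (hcat : ∀ m, catf m ∈ L) :
    ∀ f : String → List (List (String × String)),
      xs.foldl (fun d m => d.modify (catf m) [] (fun l => l ++ [m]))
          (PySem.Dict.mk (L.map (fun c => (c, f c))))
        = PySem.Dict.mk (L.map (fun c => (c, f c ++ xs.filter (fun m => catf m == c)))) := by
  induction xs with
  | nil => intro f; simp
  | cons m rest ih =>
      intro f
      rw [List.foldl_cons, pv_modify_map L f (catf m) (hcat m)]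
      rw [ih (fun c => if c = catf m then f (catf m) ++ [m] else f c)]
      congr 1
      apply List.map_congr_left
      intro c _
      by_cases h : c = catf m
      · subst h; simp
      · simp [h, Ne.symm h]

theorem pv_init_eq :
    ((pvScanCategories.map Prod.fst) ++ ["other"]).foldl
        (fun d c => d.insert c ([] : List (List (String × String)))) PySem.Dict.empty
      = PySem.Dict.mk (((pvScanCategories.map Prod.fst) ++ ["other"]).map (fun c => (c, []))) := by
  decide

-- ===== VERDICT (by name: the statement is the Claim_ definition above) =====
theorem build_category_buckets_py_spec : Claim_equal_build_category_buckets_py := by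
  intro by_vol _
  show build_category_buckets_py by_vol = build_category_buckets_py_alt by_vol
  unfold build_category_buckets_py build_category_buckets_py_alt
  rw [pv_init_eq]
  have hfun : (fun (buckets : PySem.Dict String (List (List (String × String)))) m =>
        buckets.modify (categorize_for_scan (PySem.Dict.getD (PySem.Dict.mk m) "question" "")) []
          (fun l => l ++ [m]))
      = (fun buckets m => buckets.modify (pvFirstCategory m) [] (fun l => l ++ [m])) := by
    funext b m; rw [pv_categorize_eq]
  rw [hfun]
  rw [pv_fold_modify pvFirstCategory _ by_vol pv_first_mem (fun _ => [])]
  simp
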